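-- pv_equiv track=rewrite | github.com/Sai1929/sutd_skeleton | SUTD_SUMANTH/recommendation/app/ml/training/dataset.py | _map_ppe
-- ===== SOURCE A (Python) =====
-- def _map_ppe(controls_str: str) -> str:
--     text = controls_str.lower()
--     if any(x in text for x in ["harness", "lifeline", "fall arrest", "lanyard", "crawl board"]):
--         return "Safety Harness + Lanyard"
--     if any(x in text for x in ["lockout", "loto", "lock-out", "isolation", "insulated tool",
--                                 "insulated glove"]):
--         return "Insulated Gloves + Lock-Out Tag-Out"
--     if any(x in text for x in ["respirator", "ventilation", "gas test", "gas monitor",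
--                                 "air monitor", "air test", "gas detect", "oxygen monitor"]):
--         return "Respiratory Mask + Goggles"
--     if any(x in text for x in ["chemical", "apron", "washing facilit", "barrier cream",
--                                 "protective cloth", "protective suit"]):
--         return "Chemical Resistant Gloves + Apron"
--     if any(x in text for x in ["welding shield", "arc-rated", "face shield", "fr jacket",
--                                 "arc ppe", "arc rated", "welding helmet"]):
--         return "Full Face Shield + FR Jacket"
--     if any(x in text for x in ["hearing", "ear plug", "ear protect", "ear defender", "ear"]):
--         return "Hearing Protection + Goggles"
--     if any(x in text for x in ["flashback", "fire extinguish", "hot work permit",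
--                                 "fire watch", "fire blanket"]):
--         return "Fire Extinguisher + Hot Work Permit"
--     return "Hard Hat + Safety Boots"
-- ===== SOURCE B (Python) =====
-- # Exhaustive best-match scan: instead of checking keyword groups in priority
-- # order with early return, score every keyword against the text and keep the
-- # minimum priority seen; the scan order over the table is irrelevant (the
-- # table is kept alphabetical), and the answer is a lookup into LABELS.
-- KEYWORD_PRIORITY = {
--     "air monitor": 2, "air test": 2, "apron": 3, "arc ppe": 4, "arc rated": 4,
--     "arc-rated": 4, "barrier cream": 3, "chemical": 3, "crawl board": 0,
--     "ear": 5, "ear defender": 5, "ear plug": 5, "ear protect": 5,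
--     "face shield": 4, "fall arrest": 0, "fire blanket": 6, "fire extinguish": 6,
--     "fire watch": 6, "flashback": 6, "fr jacket": 4, "gas detect": 2,
--     "gas monitor": 2, "gas test": 2, "harness": 0, "hearing": 5,
--     "hot work permit": 6, "insulated glove": 1, "insulated tool": 1,
--     "isolation": 1, "lanyard": 0, "lifeline": 0, "lock-out": 1,
--     "lockout": 1, "loto": 1, "oxygen monitor": 2, "protective cloth": 3,
--     "protective suit": 3, "respirator": 2, "ventilation": 2,
--     "washing facilit": 3, "welding helmet": 4, "welding shield": 4,
-- }
--
-- LABELS = [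
--     "Safety Harness + Lanyard",
--     "Insulated Gloves + Lock-Out Tag-Out",
--     "Respiratory Mask + Goggles",
--     "Chemical Resistant Gloves + Apron",
--     "Full Face Shield + FR Jacket",
--     "Hearing Protection + Goggles",
--     "Fire Extinguisher + Hot Work Permit",
--     "Hard Hat + Safety Boots",
-- ]
--
--
-- def _map_ppe(controls_str: str) -> str:
--     text = controls_str.lower()
--     best = len(LABELS) - 1
--     for kw, pr in KEYWORD_PRIORITY.items():
--         if pr < best and kw in text:
--             best = pr
--     return LABELS[best]
-- ===== Notes on version B (the rewrite author's own statement) =====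
-- stated objective: alternative
-- what changed: Replaces the priority-ordered early-return if-chain of keyword groups with an exhaustive scan of a flat alphabetical keyword-to-priority table that keeps the minimum priority of any matching keyword (scan order irrelevant) and then indexes a label array.
import Mathlib
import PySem

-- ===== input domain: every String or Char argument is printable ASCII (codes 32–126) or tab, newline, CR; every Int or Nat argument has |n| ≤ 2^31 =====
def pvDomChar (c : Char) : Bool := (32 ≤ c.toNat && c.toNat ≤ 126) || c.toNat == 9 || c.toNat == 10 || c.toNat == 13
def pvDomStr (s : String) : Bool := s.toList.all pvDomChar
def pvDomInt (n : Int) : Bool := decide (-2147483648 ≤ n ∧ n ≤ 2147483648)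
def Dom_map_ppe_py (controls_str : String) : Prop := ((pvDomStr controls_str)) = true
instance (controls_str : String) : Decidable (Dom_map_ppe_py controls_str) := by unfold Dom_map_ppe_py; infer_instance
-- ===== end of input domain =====

-- B replaces A's priority-ordered early-return if-chain by an exhaustive min-priority scan
-- of a flat alphabetical keyword→priority table followed by a label-array lookup (objective: alternative).

-- ===== PORT A =====
-- literal transliteration of A's if-chain
def map_ppe_py (controls_str : String) : String :=
  let text := PySem.Str.lower controls_str
  if ["harness", "lifeline", "fall arrest", "lanyard", "crawl board"].any
      (fun x => PySem.Str.isIn x text) then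
    "Safety Harness + Lanyard"
  else if ["lockout", "loto", "lock-out", "isolation", "insulated tool",
           "insulated glove"].any (fun x => PySem.Str.isIn x text) then
    "Insulated Gloves + Lock-Out Tag-Out"
  else if ["respirator", "ventilation", "gas test", "gas monitor",
           "air monitor", "air test", "gas detect", "oxygen monitor"].any
      (fun x => PySem.Str.isIn x text) then
    "Respiratory Mask + Goggles"
  else if ["chemical", "apron", "washing facilit", "barrier cream",
           "protective cloth", "protective suit"].any (fun x => PySem.Str.isIn x text) then
    "Chemical Resistant Gloves + Apron"
  else if ["welding shield", "arc-rated", "face shield", "fr jacket",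
           "arc ppe", "arc rated", "welding helmet"].any (fun x => PySem.Str.isIn x text) then
    "Full Face Shield + FR Jacket"
  else if ["hearing", "ear plug", "ear protect", "ear defender", "ear"].any
      (fun x => PySem.Str.isIn x text) then
    "Hearing Protection + Goggles"
  else if ["flashback", "fire extinguish", "hot work permit",
           "fire watch", "fire blanket"].any (fun x => PySem.Str.isIn x text) then
    "Fire Extinguisher + Hot Work Permit"
  else
    "Hard Hat + Safety Boots"

-- ===== PORT B =====
-- Source B's flat alphabetical keyword → priority table (a dict with string keys; insertion order)
def pvKEYWORD_PRIORITY : List (String × Nat) :=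
  [ ("air monitor", 2), ("air test", 2), ("apron", 3), ("arc ppe", 4), ("arc rated", 4),
    ("arc-rated", 4), ("barrier cream", 3), ("chemical", 3), ("crawl board", 0),
    ("ear", 5), ("ear defender", 5), ("ear plug", 5), ("ear protect", 5),
    ("face shield", 4), ("fall arrest", 0), ("fire blanket", 6), ("fire extinguish", 6),
    ("fire watch", 6), ("flashback", 6), ("fr jacket", 4), ("gas detect", 2),
    ("gas monitor", 2), ("gas test", 2), ("harness", 0), ("hearing", 5),
    ("hot work permit", 6), ("insulated glove", 1), ("insulated tool", 1),
    ("isolation", 1), ("lanyard", 0), ("lifeline", 0), ("lock-out", 1),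
    ("lockout", 1), ("loto", 1), ("oxygen monitor", 2), ("protective cloth", 3),
    ("protective suit", 3), ("respirator", 2), ("ventilation", 2),
    ("washing facilit", 3), ("welding helmet", 4), ("welding shield", 4) ]

def pvLABELS : List String :=
  [ "Safety Harness + Lanyard",
    "Insulated Gloves + Lock-Out Tag-Out",
    "Respiratory Mask + Goggles",
    "Chemical Resistant Gloves + Apron",
    "Full Face Shield + FR Jacket",
    "Hearing Protection + Goggles",
    "Fire Extinguisher + Hot Work Permit",
    "Hard Hat + Safety Boots" ]

-- Source B's loop: best = len(LABELS)-1; for kw, pr in KEYWORD_PRIORITY.items(): if pr < best and kw in text: best = pr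
-- return LABELS[best]  (best ≤ 7 always, so the pyGet? is always some; getD "" only totalizes)
def map_ppe_py_alt (controls_str : String) : String :=
  let text := PySem.Str.lower controls_str
  let best := pvKEYWORD_PRIORITY.foldl
      (fun best kp => if kp.2 < best && PySem.Str.isIn kp.1 text then kp.2 else best)
      (pvLABELS.length - 1)
  (PySem.List.pyGet? pvLABELS (best : Int)).getD ""

-- ===== PRECONDITION & SPEC =====
def Spec_map_ppe_py (controls_str : String) (out : String) : Prop := out = map_ppe_py_alt controls_str
instance (controls_str : String) (out : String) : Decidable (Spec_map_ppe_py controls_str out) := by unfold Spec_map_ppe_py; infer_instance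

-- ===== CLAIM =====
def Claim_equal_map_ppe_py : Prop := ∀ (controls_str : String), Dom_map_ppe_py controls_str → Spec_map_ppe_py controls_str (map_ppe_py controls_str)

-- ===== LEMMAS AND PROOFS =====

-- the "score" of one table entry against text t: its priority if it matches, else the neutral 7
def pvW (t : String) (kp : String × Nat) : Nat := if PySem.Str.isIn kp.1 t then kp.2 else 7

-- B's left fold with min-update equals min of the start value and a right fold of the scores
lemma pvFold_eq (t : String) : ∀ (l : List (String × Nat)) (b : Nat), b ≤ 7 →
    l.foldl (fun best kp => if kp.2 < best && PySem.Str.isIn kp.1 t then kp.2 else best) b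
      = min b (l.foldr (fun kp a => min (pvW t kp) a) 7) := by
  intro l
  induction l with
  | nil => intro b hb; simpa using by omega
  | cons x xs ih =>
    intro b hb
    simp only [List.foldl_cons, List.foldr_cons]
    have hb' : (if x.2 < b && PySem.Str.isIn x.1 t then x.2 else b) ≤ 7 := by
      split
      · next h =>
          rw [Bool.and_eq_true] at h
          have := of_decide_eq_true h.1
          omega
      · exact hb
    rw [ih _ hb']
    unfold pvW
    by_cases h : PySem.Chars.isIn x.1.toList t.toList = true <;>
      by_cases hx : x.2 < b <;>
        simp [h, hx] <;> omega

-- min-score fold over one group (every entry carries the same priority p):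
-- p if any keyword of the group matches, combined with the accumulator
lemma pvGrpMap (t : String) (p : Nat) (ks : List String) (acc : Nat) (hacc : acc ≤ 7) :
    ((ks.map (fun k => (k, p))).foldr (fun kp a => min (pvW t kp) a) acc)
      = if ks.any (fun x => PySem.Str.isIn x t) then min p acc else acc := by
  induction ks with
  | nil => simp
  | cons k ks ih =>
    simp only [List.map_cons, List.foldr_cons, List.any_cons, ih]
    unfold pvW
    by_cases h : PySem.Chars.isIn k.toList t.toList = true <;>
      by_cases h2 : (∃ x ∈ ks, PySem.Chars.isIn x.toList t.toList = true) <;>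
        simp [h, h2] <;> omega

-- the table, regrouped into A's seven groups (a permutation of pvKEYWORD_PRIORITY)
def pvGrouped : List (String × Nat) :=
  (["harness", "lifeline", "fall arrest", "lanyard", "crawl board"].map (fun k => (k, 0))) ++
  (["lockout", "loto", "lock-out", "isolation", "insulated tool", "insulated glove"].map (fun k => (k, 1))) ++
  (["respirator", "ventilation", "gas test", "gas monitor", "air monitor", "air test",
    "gas detect", "oxygen monitor"].map (fun k => (k, 2))) ++
  (["chemical", "apron", "washing facilit", "barrier cream", "protective cloth",
    "protective suit"].map (fun k => (k, 3))) ++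
  (["welding shield", "arc-rated", "face shield", "fr jacket", "arc ppe", "arc rated",
    "welding helmet"].map (fun k => (k, 4))) ++
  (["hearing", "ear plug", "ear protect", "ear defender", "ear"].map (fun k => (k, 5))) ++
  (["flashback", "fire extinguish", "hot work permit", "fire watch", "fire blanket"].map (fun k => (k, 6)))

set_option maxHeartbeats 2000000 in
lemma pvPerm : pvKEYWORD_PRIORITY.Perm pvGrouped := by decide

-- ===== VERDICT =====
set_option maxHeartbeats 1000000 in
theorem map_ppe_py_spec : Claim_equal_map_ppe_py := by
  intro s _
  unfold Spec_map_ppe_py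
  simp only [map_ppe_py, map_ppe_py_alt]
  have hperm := pvPerm.foldr_eq
      (lcomm := ⟨fun a c d => by unfold pvW; omega⟩)
      (b := (7 : Nat)) (f := fun kp a => min (pvW (PySem.Str.lower s) kp) a)
  have hlen : pvLABELS.length - 1 = 7 := by decide
  rw [hlen, pvFold_eq _ _ _ (by omega), hperm]
  unfold pvGrouped
  simp only [List.foldr_append]
  rw [pvGrpMap _ 6 ["flashback", "fire extinguish", "hot work permit", "fire watch",
        "fire blanket"] _ (by omega)]
  rw [pvGrpMap _ 5 ["hearing", "ear plug", "ear protect", "ear defender", "ear"] _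
        (by split_ifs <;> omega)]
  rw [pvGrpMap _ 4 ["welding shield", "arc-rated", "face shield", "fr jacket", "arc ppe",
        "arc rated", "welding helmet"] _ (by split_ifs <;> omega)]
  rw [pvGrpMap _ 3 ["chemical", "apron", "washing facilit", "barrier cream",
        "protective cloth", "protective suit"] _ (by split_ifs <;> omega)]
  rw [pvGrpMap _ 2 ["respirator", "ventilation", "gas test", "gas monitor", "air monitor",
        "air test", "gas detect", "oxygen monitor"] _ (by split_ifs <;> omega)]
  rw [pvGrpMap _ 1 ["lockout", "loto", "lock-out", "isolation", "insulated tool",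
        "insulated glove"] _ (by split_ifs <;> omega)]
  rw [pvGrpMap _ 0 ["harness", "lifeline", "fall arrest", "lanyard", "crawl board"] _
        (by split_ifs <;> omega)]
  generalize (["harness", "lifeline", "fall arrest", "lanyard", "crawl board"].any
      fun x => PySem.Str.isIn x (PySem.Str.lower s)) = g0
  generalize (["lockout", "loto", "lock-out", "isolation", "insulated tool",
      "insulated glove"].any fun x => PySem.Str.isIn x (PySem.Str.lower s)) = g1
  generalize (["respirator", "ventilation", "gas test", "gas monitor", "air monitor",
      "air test", "gas detect", "oxygen monitor"].any
      fun x => PySem.Str.isIn x (PySem.Str.lower s)) = g2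
  generalize (["chemical", "apron", "washing facilit", "barrier cream", "protective cloth",
      "protective suit"].any fun x => PySem.Str.isIn x (PySem.Str.lower s)) = g3
  generalize (["welding shield", "arc-rated", "face shield", "fr jacket", "arc ppe",
      "arc rated", "welding helmet"].any fun x => PySem.Str.isIn x (PySem.Str.lower s)) = g4
  generalize (["hearing", "ear plug", "ear protect", "ear defender", "ear"].any
      fun x => PySem.Str.isIn x (PySem.Str.lower s)) = g5
  generalize (["flashback", "fire extinguish", "hot work permit", "fire watch",
      "fire blanket"].any fun x => PySem.Str.isIn x (PySem.Str.lower s)) = g6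
  cases g0 <;> cases g1 <;> cases g2 <;> cases g3 <;> cases g4 <;> cases g5 <;> cases g6 <;>
    rfl
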